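-- pv_equiv track=rewrite | github.com/renqianluo/NAO | NAO-WS/cnn/calculate_ops.py | _nas_dil_sep_conv
-- ===== SOURCE A (Python) =====
-- def get_channel_dim(x):
--     return x[-1]
--
-- def _nas_dil_sep_conv(x, curr_cell, prev_cell, filter_size, out_filters, dilation_rate=2, stack_conv=2):
--   params = 0
--   for conv_id in range(stack_conv):
--     inp_c = get_channel_dim(x)
--     params += filter_size * filter_size * inp_c * 1
--     params += inp_c * out_filters
--     params += out_filters * 4
--   return x, params
-- ===== SOURCE B (Python) =====
-- def _per_conv_params(filter_size, inp_c, out_filters):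
--     # cost of one dilated separable conv: depthwise + pointwise + 4*out_filters (bn etc.)
--     return filter_size * filter_size * inp_c + inp_c * out_filters + out_filters * 4
--
-- def _nas_dil_sep_conv(x, curr_cell, prev_cell, filter_size, out_filters, dilation_rate=2, stack_conv=2):
--     if stack_conv <= 0:
--         return x, 0
--     return x, stack_conv * _per_conv_params(filter_size, x[-1], out_filters)
-- ===== Notes on version B (the rewrite author's own statement) =====
-- stated objective: simpler
-- what changed: Replaces the accumulating for-loop (each iteration adds the same constant) by a single closed-form multiplication stack_conv * per_conv_cost, with the per-conv cost factored into a helper and x[-1] read once.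
import Mathlib
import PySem

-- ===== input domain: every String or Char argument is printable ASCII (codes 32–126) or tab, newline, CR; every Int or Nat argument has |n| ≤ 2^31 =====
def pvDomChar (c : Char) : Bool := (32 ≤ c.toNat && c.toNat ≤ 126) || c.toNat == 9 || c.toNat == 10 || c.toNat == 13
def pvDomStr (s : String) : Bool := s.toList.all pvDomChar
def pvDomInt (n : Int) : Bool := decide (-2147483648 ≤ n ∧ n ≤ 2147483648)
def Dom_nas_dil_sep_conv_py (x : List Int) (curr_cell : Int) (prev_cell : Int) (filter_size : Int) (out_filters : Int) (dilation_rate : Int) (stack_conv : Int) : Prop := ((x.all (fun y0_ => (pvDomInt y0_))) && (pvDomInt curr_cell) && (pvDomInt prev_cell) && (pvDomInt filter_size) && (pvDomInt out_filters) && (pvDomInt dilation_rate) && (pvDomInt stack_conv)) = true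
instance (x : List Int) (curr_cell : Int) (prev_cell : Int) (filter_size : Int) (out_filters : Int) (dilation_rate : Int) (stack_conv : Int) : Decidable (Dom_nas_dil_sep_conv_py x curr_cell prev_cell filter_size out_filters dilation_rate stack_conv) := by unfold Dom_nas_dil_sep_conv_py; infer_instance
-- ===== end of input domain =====

-- B replaces A's accumulating loop (each iteration adds the same constant) by one
-- closed-form multiplication of a factored-out per-conv cost; objective: simpler.
-- ===== PORT A =====
def nas_dil_sep_conv_py (x : List Int) (curr_cell : Int) (prev_cell : Int) (filter_size : Int) (out_filters : Int) (dilation_rate : Int) (stack_conv : Int) : List Int × Int :=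
  let params : Int :=
    (PySem.List.pyRange 0 stack_conv 1).foldl
      (fun params _conv_id =>
        let inp_c := (PySem.List.pyGet? x (-1)).getD 0   -- get_channel_dim(x) = x[-1]; none (IndexError) excluded by Pre_
        params + filter_size * filter_size * inp_c * 1 + inp_c * out_filters + out_filters * 4)
      0
  (x, params)

-- ===== PORT B =====
-- cost of one dilated separable conv (Source B's _per_conv_params)
def perConvParams (filter_size : Int) (inp_c : Int) (out_filters : Int) : Int :=
  filter_size * filter_size * inp_c + inp_c * out_filters + out_filters * 4

def nas_dil_sep_conv_py_alt (x : List Int) (curr_cell : Int) (prev_cell : Int) (filter_size : Int) (out_filters : Int) (dilation_rate : Int) (stack_conv : Int) : List Int × Int :=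
  if stack_conv ≤ 0 then (x, 0)
  else (x, stack_conv * perConvParams filter_size ((PySem.List.pyGet? x (-1)).getD 0) out_filters)
  -- x[-1]: none (IndexError) excluded by Pre_

-- ===== PRECONDITION & SPEC =====
-- Pre_ excludes exactly the inputs where both Pythons raise IndexError: x empty while stack_conv ≥ 1.
def Pre_nas_dil_sep_conv_py (x : List Int) (curr_cell : Int) (prev_cell : Int) (filter_size : Int) (out_filters : Int) (dilation_rate : Int) (stack_conv : Int) : Prop :=
  stack_conv ≤ 0 ∨ x ≠ []
instance (x : List Int) (curr_cell : Int) (prev_cell : Int) (filter_size : Int) (out_filters : Int) (dilation_rate : Int) (stack_conv : Int) : Decidable (Pre_nas_dil_sep_conv_py x curr_cell prev_cell filter_size out_filters dilation_rate stack_conv) := by unfold Pre_nas_dil_sep_conv_py; infer_instance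
def pvWitness_nas_dil_sep_conv_py : List Int × Int × Int × Int × Int × Int × Int := ([8], 1, 0, 3, 16, 2, 2)
def Spec_nas_dil_sep_conv_py (x : List Int) (curr_cell : Int) (prev_cell : Int) (filter_size : Int) (out_filters : Int) (dilation_rate : Int) (stack_conv : Int) (out : List Int × Int) : Prop := out = nas_dil_sep_conv_py_alt x curr_cell prev_cell filter_size out_filters dilation_rate stack_conv
instance (x : List Int) (curr_cell : Int) (prev_cell : Int) (filter_size : Int) (out_filters : Int) (dilation_rate : Int) (stack_conv : Int) (out : List Int × Int) : Decidable (Spec_nas_dil_sep_conv_py x curr_cell prev_cell filter_size out_filters dilation_rate stack_conv out) := by unfold Spec_nas_dil_sep_conv_py; infer_instance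

-- ===== CLAIM (what is proved, stated in full; the proofs are below) =====
def Claim_equal_nas_dil_sep_conv_py : Prop := ∀ (x : List Int) (curr_cell : Int) (prev_cell : Int) (filter_size : Int) (out_filters : Int) (dilation_rate : Int) (stack_conv : Int), Dom_nas_dil_sep_conv_py x curr_cell prev_cell filter_size out_filters dilation_rate stack_conv → Pre_nas_dil_sep_conv_py x curr_cell prev_cell filter_size out_filters dilation_rate stack_conv → Spec_nas_dil_sep_conv_py x curr_cell prev_cell filter_size out_filters dilation_rate stack_conv (nas_dil_sep_conv_py x curr_cell prev_cell filter_size out_filters dilation_rate stack_conv)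

-- ===== LEMMAS AND PROOFS =====
-- A's loop body adds the same three constants every iteration, so the fold is length * their sum.
theorem pv_foldl_const3 (c1 c2 c3 : Int) (l : List Int) : ∀ (a : Int),
    List.foldl (fun p (_ : Int) => p + c1 + c2 + c3) a l = a + l.length * (c1 + c2 + c3) := by
  induction l with
  | nil => intro a; simp
  | cons h t ih => intro a; simp [List.foldl, ih]; ring

theorem pv_witness_ok : Dom_nas_dil_sep_conv_py (pvWitness_nas_dil_sep_conv_py.1) (pvWitness_nas_dil_sep_conv_py.2.1) (pvWitness_nas_dil_sep_conv_py.2.2.1) (pvWitness_nas_dil_sep_conv_py.2.2.2.1) (pvWitness_nas_dil_sep_conv_py.2.2.2.2.1) (pvWitness_nas_dil_sep_conv_py.2.2.2.2.2.1) (pvWitness_nas_dil_sep_conv_py.2.2.2.2.2.2) ∧ Pre_nas_dil_sep_conv_py (pvWitness_nas_dil_sep_conv_py.1) (pvWitness_nas_dil_sep_conv_py.2.1) (pvWitness_nas_dil_sep_conv_py.2.2.1) (pvWitness_nas_dil_sep_conv_py.2.2.2.1) (pvWitness_nas_dil_sep_conv_py.2.2.2.2.1) (pvWitness_nas_dil_sep_conv_py.2.2.2.2.2.1)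 (pvWitness_nas_dil_sep_conv_py.2.2.2.2.2.2) := by
  decide

-- ===== VERDICT (by name: the statement is the Claim_ definition above) =====
theorem nas_dil_sep_conv_py_spec : Claim_equal_nas_dil_sep_conv_py := by
  intro x curr_cell prev_cell filter_size out_filters dilation_rate stack_conv _hd _hp
  unfold Spec_nas_dil_sep_conv_py nas_dil_sep_conv_py nas_dil_sep_conv_py_alt perConvParams
  by_cases hs : stack_conv ≤ 0
  · rw [PySem.List.pyRange_one_eq_nil (by omega)]
    simp [hs]
  · rw [pv_foldl_const3, PySem.List.length_pyRange_one]
    have hlen : (((stack_conv - 0).toNat : Int)) = stack_conv := by omega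
    simp only [if_neg hs]
    push_cast [hlen]
    refine Prod.ext rfl ?_
    ring
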